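-- pv_equiv track=rewrite | github.com/DatLombardo/VCLab-UG-Thesis | Importance Scores/ImportanceScores.py | seperateVideos
-- ===== SOURCE A (Python) =====
-- def seperateVideos(data):
--     vidNames = []
--     dataContainer = [[],[], [], [], []]
--     for val in data:
--         if not(val[0] in vidNames):
--             vidNames.append(val[0])
--         dataContainer[vidNames.index(val[0])].append(val)
--     return vidNames, dataContainer
-- ===== SOURCE B (Python) =====
-- def seperateVideos(data):
--     vidNames = list(dict.fromkeys(val[0] for val in data))
--     dataContainer = [[val for val in data if val[0] == name] for name in vidNames]
--     dataContainer += [[]] * (5 - len(vidNames))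
--     return vidNames, dataContainer
-- ===== Notes on version B (the rewrite author's own statement) =====
-- stated objective: simpler
-- what changed: A interleaves name discovery and appending via repeated list membership and .index lookups inside one loop; B first computes the ordered distinct names with dict.fromkeys, then builds each group in one comprehension as a stable filter of data, padding with empty lists up to the fixed 5 slots.
-- crash fix: On data with more than 5 distinct first fields A raises IndexError (its container has exactly 5 slots) while B returns all groups; these inputs are outside Pre_. — e.g. on seperateVideos([["a"], ["b"], ["c"], ["d"], ["e"], ["f"]]): A raises IndexError, B returns (["a", "b", "c", "d", "e", "f"], [[["a"]], [["b"]], [["c"]], [["d"]], [["e"]], [["f"]]])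
import Mathlib
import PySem

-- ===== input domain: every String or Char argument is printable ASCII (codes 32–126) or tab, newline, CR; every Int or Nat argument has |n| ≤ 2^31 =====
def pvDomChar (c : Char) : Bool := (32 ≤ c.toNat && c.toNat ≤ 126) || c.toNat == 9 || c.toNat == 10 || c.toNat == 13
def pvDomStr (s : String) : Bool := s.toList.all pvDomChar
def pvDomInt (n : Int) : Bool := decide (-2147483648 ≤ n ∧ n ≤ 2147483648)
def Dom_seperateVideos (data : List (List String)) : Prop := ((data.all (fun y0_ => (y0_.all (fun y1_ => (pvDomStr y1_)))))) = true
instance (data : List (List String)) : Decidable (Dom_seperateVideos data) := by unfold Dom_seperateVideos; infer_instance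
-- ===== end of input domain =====

-- B replaces A's single loop (membership test + .index per row) by dict.fromkeys for the
-- ordered distinct names followed by one filter comprehension per name: simpler, same cost.


-- val[0] made total: equals the first field on the nonempty rows Pre_ admits
def pvHd (val : List String) : String := (PySem.List.pyGet? val 0).getD ""

-- ===== PORT A =====
-- one loop iteration of A's for-loop: discover the name, then append the row at its index
def pvStepA (st : List String × List (List (List String))) (val : List String) :
    List String × List (List (List String)) :=
  match PySem.List.pyGet? val 0 with
  | none => st            -- val[0] raises IndexError (excluded by Pre_)
  | some v =>
    let names := if st.1.contains v then st.1 else st.1 ++ [v]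
    match PySem.List.index? names v with
    | none => (names, st.2)   -- unreachable: v was just inserted
    | some i =>
      match st.2[i]? with
      | none => (names, st.2) -- dataContainer[i] raises IndexError (excluded by Pre_)
      | some row => (names, st.2.set i (row ++ [val]))

def seperateVideos (data : List (List String)) : List String × List (List (List String)) :=
  data.foldl pvStepA ([], [[], [], [], [], []])

-- ===== PORT B =====
def seperateVideos_alt (data : List (List String)) : List String × List (List (List String)) :=
  let vidNames := PySem.List.dedup (data.map pvHd)
  let dataContainer := vidNames.map (fun name => data.filter (fun val => pvHd val == name))
  (vidNames, dataContainer ++ List.replicate (5 - vidNames.length) [])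

-- ===== PRECONDITION & SPEC =====
-- Pre_ excludes exactly the inputs where A raises IndexError: a row with an empty field list
-- (val[0]) or more than 5 distinct first fields (dataContainer has only 5 slots).
def Pre_seperateVideos (data : List (List String)) : Prop :=
  (∀ val ∈ data, val ≠ []) ∧ (PySem.List.dedup (data.map pvHd)).length ≤ 5
instance (data : List (List String)) : Decidable (Pre_seperateVideos data) := by
  unfold Pre_seperateVideos; infer_instance

def pvWitness_seperateVideos : List (List String) :=
  [["a", "1"], ["b", "2"], ["a", "3"]]

-- On data whose rows are nonempty but with more than 5 distinct first fields, A raises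
-- IndexError while B returns every group.
def Raises_seperateVideos (data : List (List String)) : Prop :=
  (∀ val ∈ data, val ≠ []) ∧ 6 ≤ (PySem.List.dedup (data.map pvHd)).length
instance (data : List (List String)) : Decidable (Raises_seperateVideos data) := by
  unfold Raises_seperateVideos; infer_instance

def pvRaiseWitness_seperateVideos : List (List String) :=
  [["a"], ["b"], ["c"], ["d"], ["e"], ["f"]]
def pvRaiseWitnessOut_seperateVideos : List String × List (List (List String)) :=
  (["a", "b", "c", "d", "e", "f"],
   [[["a"]], [["b"]], [["c"]], [["d"]], [["e"]], [["f"]]])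

def Spec_seperateVideos (data : List (List String)) (out : List String × List (List (List String))) : Prop := out = seperateVideos_alt data
instance (data : List (List String)) (out : List String × List (List (List String))) : Decidable (Spec_seperateVideos data out) := by unfold Spec_seperateVideos; infer_instance

-- ===== CLAIM (what is proved, stated in full; the proofs are below) =====
def Claim_equal_seperateVideos : Prop := ∀ (data : List (List String)), Dom_seperateVideos data → Pre_seperateVideos data → Spec_seperateVideos data (seperateVideos data)

def Claim_raises_seperateVideos : Prop :=
  (∀ (data : List (List String)), Dom_seperateVideos data → Raises_seperateVideos data → ¬ Pre_seperateVideos data) ∧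
  (Dom_seperateVideos (pvRaiseWitness_seperateVideos) ∧ Raises_seperateVideos (pvRaiseWitness_seperateVideos) ∧
   seperateVideos_alt (pvRaiseWitness_seperateVideos) = pvRaiseWitnessOut_seperateVideos)

-- ===== LEMMAS AND PROOFS =====

-- A's fold state after any processed prefix p: the names seen so far in first-occurrence
-- order, and the 5-slot container whose i-th slot is the stable filter of p by the i-th name.
theorem foldA_characterisation (p : List (List String))
    (hne : ∀ val ∈ p, val ≠ [])
    (hle : (PySem.List.dedup (p.map pvHd)).length ≤ 5) :
    p.foldl pvStepA ([], [[], [], [], [], []]) =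
      (PySem.List.dedup (p.map pvHd),
       (PySem.List.dedup (p.map pvHd)).map
           (fun name => p.filter (fun val => pvHd val == name))
         ++ List.replicate (5 - (PySem.List.dedup (p.map pvHd)).length) []) := by
  induction p using List.reverseRecOn with
  | nil => rfl
  | append_singleton p val ih =>
    have hval : val ≠ [] := hne val (by simp)
    obtain ⟨x, xs, rfl⟩ := List.exists_cons_of_ne_nil hval
    have hx : pvHd (x :: xs) = x := by simp [pvHd]
    have hdedup : PySem.List.dedup ((p ++ [x :: xs]).map pvHd)
        = if (PySem.List.dedup (p.map pvHd)).contains x then PySem.List.dedup (p.map pvHd)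
          else PySem.List.dedup (p.map pvHd) ++ [x] := by
      simp only [List.map_append, List.map_cons, List.map_nil, hx,
        PySem.List.dedup_eq_ofList, PySem.Set.ofList_append_singleton]
      rfl
    rw [hdedup] at hle ⊢
    set N := PySem.List.dedup (p.map pvHd) with hNdef
    have hnodup : N.Nodup := PySem.List.nodup_dedup _
    have hle0 : N.length ≤ 5 := by
      split at hle
      · exact hle
      · simp at hle; omega
    have hne' : ∀ w ∈ p, w ≠ [] := fun w hw => hne w (List.mem_append_left _ hw)
    rw [List.foldl_append, List.foldl_cons, List.foldl_nil, ih hne' hle0]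
    show pvStepA _ _ = _
    rw [pvStepA]
    simp only [PySem.List.pyGet?_zero_cons]
    by_cases hv : x ∈ N
    · -- existing name: index stays, one slot gets the row appended
      have hcont : N.contains x = true := by simpa using hv
      simp only [hcont, if_true]
      cases hidx : PySem.List.index? N x with
      | none =>
        rw [PySem.List.index?_eq_none_iff] at hidx
        exact absurd hv hidx
      | some i =>
        obtain ⟨hi, hNi, hprior⟩ := PySem.List.getElem_of_index?_eq_some hidx
        have hCi : (N.map (fun name => p.filter (fun w => pvHd w == name))
            ++ List.replicate (5 - N.length) ([] : List (List String)))[i]?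
            = some (p.filter (fun w => pvHd w == x)) := by
          rw [List.getElem?_append_left (by simpa using hi)]
          simp [hi, hNi]
        simp only [hCi]
        refine congrArg (Prod.mk N) ?_
        apply List.ext_getElem
        · simp
        · intro j hj1 hj2
          simp only [List.length_set, List.length_append, List.length_map,
            List.length_replicate] at hj1
          by_cases hjN : j < N.length
          · rw [List.getElem_set, List.getElem_append_left (by simpa using hjN),
              List.getElem_map]
            conv_rhs => rw [List.getElem_append_left (by simpa using hjN), List.getElem_map]
            simp only [List.filter_append, List.filter_cons, List.filter_nil, hx]
            by_cases hji : i = j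
            · subst hji
              simp [hNi]
            · have hne2 : N[j] ≠ x := by
                intro hEq
                exact hji (hnodup.getElem_inj_iff.mp (hNi.trans hEq.symm) ▸ rfl)
              simp [hji, Ne.symm hne2]
          · -- replicate region: untouched by the set (i < N.length ≤ j)
            rw [List.getElem_set_ne (by omega)]
            rw [List.getElem_append_right (by simpa using hjN),
              List.getElem_append_right (by simpa using hjN)]
            simp
    · -- new name: appended to names, lands in the first empty slot
      have hcont : N.contains x = false := by simpa using hv
      simp only [hcont, if_false, Bool.false_eq_true]
      have hlen1 : N.length + 1 ≤ 5 := by rw [hcont] at hle; simpa using hle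
      rw [PySem.List.index?_append_singleton_self N x hv]
      have hCk : (N.map (fun name => p.filter (fun w => pvHd w == name))
          ++ List.replicate (5 - N.length) ([] : List (List String)))[N.length]?
          = some [] := by
        rw [List.getElem?_append_right (by simp)]
        simp only [List.length_map, Nat.sub_self, List.getElem?_replicate]
        rw [if_pos (by omega)]
      simp only [hCk]
      refine congrArg (Prod.mk (N ++ [x])) ?_
      apply List.ext_getElem
      · simp; omega
      · intro j hj1 hj2
        simp only [List.length_set, List.length_append, List.length_map,
          List.length_replicate] at hj1
        have hfx : p.filter (fun w => pvHd w == x) = [] := by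
          apply List.filter_eq_nil_iff.mpr
          intro w hw
          simp only [beq_iff_eq]
          intro hEq
          apply hv
          rw [hNdef, PySem.List.mem_dedup]  -- guess name: mem_dedup
          exact hEq ▸ List.mem_map_of_mem hw
        by_cases hjN : j < N.length
        · rw [List.getElem_set_ne (by omega), List.getElem_append_left (by simpa using hjN),
            List.getElem_map]
          conv_rhs => rw [List.getElem_append_left (by simp; omega)]
          rw [List.getElem_map, List.getElem_append_left hjN]
          simp only [List.filter_append, List.filter_cons, List.filter_nil, hx]
          have hne2 : N[j] ≠ x := fun hEq => hv (hEq ▸ List.getElem_mem hjN)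
          simp [Ne.symm hne2]
        · by_cases hjk : j = N.length
          · subst hjk
            rw [List.getElem_set_self (by simp; omega)]
            conv_rhs => rw [List.getElem_append_left (by simp)]
            rw [List.getElem_map]
            have hgx : (N ++ [x])[N.length]'(by simp) = x := by simp
            rw [hgx]
            simp only [List.filter_append, List.filter_cons, List.filter_nil, hx, hfx]
            simp
          · rw [List.getElem_set_ne (by omega)]
            rw [List.getElem_append_right (by simpa using hjN)]
            conv_rhs => rw [List.getElem_append_right (by simp; omega)]
            simp

-- ===== VERDICT (by name: the statement is the Claim_ definition above) =====
theorem seperateVideos_spec : Claim_equal_seperateVideos := by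
  intro data _ hpre
  unfold Spec_seperateVideos seperateVideos seperateVideos_alt
  exact foldA_characterisation data hpre.1 hpre.2

@[simp]
theorem seperateVideos_raises : Claim_raises_seperateVideos := by
  unfold Claim_raises_seperateVideos
  refine ⟨?_, by decide⟩
  intro data _ hr hp
  have h1 := hr.2
  have h2 := hp.2
  omega
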